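-- pv_equiv track=rewrite | github.com/peanute123/some-template-of-leetcode | 二维差分.py | check
-- ===== SOURCE A (Python) =====
-- def check(day,points):
--     pxs = set()
--     pys = set()
--     for px,py in  points :
--         pxs.add(px - day)
--         pxs.add(px + day +1)
--         pys.add(py - day )
--         pys.add(py + day +1)
--
--     pxs = sorted(list(pxs))
--     pys = sorted(list(pys))
--     mapx = { v:k for k,v in enumerate(pxs) }
--     mapy = { v:k for k,v in enumerate(pys) }
--     m,n = len(mapx) + 1 ,len(mapy) + 1
--     diff = [ [0]*n for _ in range(m)]
--     for px,py in points :
--         diff[ mapx[px - day] + 1 ][ mapy[py - day] + 1 ] += 1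
--         diff[ mapx[px - day] + 1 ][ mapy[py + day + 1] + 1 ] -= 1
--         diff[ mapx[px + day + 1] + 1 ][ mapy[py - day]  + 1] -= 1
--         diff[ mapx[px + day + 1]  + 1][ mapy[py + day + 1] + 1 ] += 1
--     ans = 0
--     #还原从1开始，0行0列不用还原了本来就是
--     for i in range(1,m ):
--         for j in range(1,n):
--             diff[i][j] += diff[i-1][j] + diff[i][j-1] - diff[i-1][j-1]
--             ans = max( ans , diff[i][j])
--     return ans
-- ===== SOURCE B (Python) =====
-- def check(day, points):
--     xs = sorted({c for px, py in points for c in (px - day, px + day + 1)})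
--     ys = sorted({c for px, py in points for c in (py - day, py + day + 1)})
--     best = 0
--     for x in xs:
--         for y in ys:
--             cnt = 0
--             for px, py in points:
--                 if px - day <= x <= px + day and py - day <= y <= py + day:
--                     cnt += 1
--             best = max(best, cnt)
--     return best
-- ===== Notes on version B (the rewrite author's own statement) =====
-- stated objective: alternative
-- what changed: Replaces A's dict-based coordinate compression plus 2D difference array with in-place prefix sums by a direct triple loop that counts, for every compressed candidate cell (x,y), how many squares cover it; no dicts, no diff array, no prefix sums.
-- outside the precondition, e.g. on check(-2, [(0, 0), (1, 1)]): A returns 2, B returns 0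
import Mathlib
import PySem

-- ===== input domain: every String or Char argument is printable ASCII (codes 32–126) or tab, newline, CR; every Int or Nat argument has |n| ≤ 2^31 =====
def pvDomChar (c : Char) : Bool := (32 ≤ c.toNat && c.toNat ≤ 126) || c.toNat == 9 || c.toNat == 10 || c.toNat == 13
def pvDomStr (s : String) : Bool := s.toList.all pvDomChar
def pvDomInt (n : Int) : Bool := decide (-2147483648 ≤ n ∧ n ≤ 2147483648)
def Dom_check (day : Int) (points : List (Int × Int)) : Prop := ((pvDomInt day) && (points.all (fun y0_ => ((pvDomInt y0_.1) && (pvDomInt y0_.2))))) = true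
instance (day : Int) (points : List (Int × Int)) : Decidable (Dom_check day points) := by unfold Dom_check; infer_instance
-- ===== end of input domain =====

-- B replaces A's 2D difference array + in-place prefix sums with a direct count of
-- covering squares at each compressed candidate cell (alternative decomposition; not faster).


-- ===== PORT A =====
-- diff[i][j] (read); indices stay Python ints
def pvGet2 (d : List (List Int)) (i j : Int) : Int :=
  PySem.List.pyGetD (PySem.List.pyGetD d i []) j 0

-- diff[i][j] += v
def pvAdd2 (d : List (List Int)) (i j v : Int) : List (List Int) :=
  PySem.List.pySetD d i
    (PySem.List.pySetD (PySem.List.pyGetD d i []) j (pvGet2 d i j + v))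

-- { v:k for k,v in enumerate(l) }
def pvMkMap (l : List Int) : PySem.Dict Int Int :=
  (PySem.List.enumerate l 0).foldl (fun (d : PySem.Dict Int Int) kv => d.insert kv.2 kv.1)
    PySem.Dict.empty

-- mapx[v] : dict lookup (key always present when reached; .getD 0 is the total form)
def pvLook (d : PySem.Dict Int Int) (v : Int) : Int := (d.get? v).getD 0

def check (day : Int) (points : List (Int × Int)) : Int :=
  -- for px,py in points: pxs.add(px-day); pxs.add(px+day+1); pys.add(…) (two sets, one loop)
  let sets := points.foldl
    (fun (sp : PySem.Set Int × PySem.Set Int) p =>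
      (PySem.Set.add (PySem.Set.add sp.1 (p.1 - day)) (p.1 + day + 1),
       PySem.Set.add (PySem.Set.add sp.2 (p.2 - day)) (p.2 + day + 1)))
    (PySem.Set.empty, PySem.Set.empty)
  let pxs := PySem.List.sorted sets.1 (fun x => x) false
  let pys := PySem.List.sorted sets.2 (fun x => x) false
  let mapx := pvMkMap pxs
  let mapy := pvMkMap pys
  let m : Int := (mapx.size : Int) + 1
  let n : Int := (mapy.size : Int) + 1
  let diff : List (List Int) := (List.range m.toNat).map (fun _ => List.replicate n.toNat 0)
  let diff := points.foldl
    (fun d p =>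
      let d := pvAdd2 d (pvLook mapx (p.1 - day) + 1) (pvLook mapy (p.2 - day) + 1) 1
      let d := pvAdd2 d (pvLook mapx (p.1 - day) + 1) (pvLook mapy (p.2 + day + 1) + 1) (-1)
      let d := pvAdd2 d (pvLook mapx (p.1 + day + 1) + 1) (pvLook mapy (p.2 - day) + 1) (-1)
      pvAdd2 d (pvLook mapx (p.1 + day + 1) + 1) (pvLook mapy (p.2 + day + 1) + 1) 1)
    diff
  let st := (PySem.List.pyRange 1 m 1).foldl
    (fun (st : List (List Int) × Int) i =>
      (PySem.List.pyRange 1 n 1).foldl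
        (fun (st : List (List Int) × Int) j =>
          let v := pvGet2 st.1 i j + (pvGet2 st.1 (i-1) j + pvGet2 st.1 i (j-1) - pvGet2 st.1 (i-1) (j-1))
          (pvAdd2 st.1 i j (pvGet2 st.1 (i-1) j + pvGet2 st.1 i (j-1) - pvGet2 st.1 (i-1) (j-1)),
           max st.2 v))
        st)
    (diff, 0)
  st.2

-- ===== PORT B =====
def check_alt (day : Int) (points : List (Int × Int)) : Int :=
  let xs := PySem.List.sorted
    (PySem.Set.ofList (points.flatMap (fun p => [p.1 - day, p.1 + day + 1]))) (fun x => x) false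
  let ys := PySem.List.sorted
    (PySem.Set.ofList (points.flatMap (fun p => [p.2 - day, p.2 + day + 1]))) (fun x => x) false
  xs.foldl (fun best x =>
    ys.foldl (fun best y =>
      let cnt := points.foldl (fun cnt p =>
        if p.1 - day ≤ x ∧ x ≤ p.1 + day ∧ p.2 - day ≤ y ∧ y ≤ p.2 + day then cnt + 1 else cnt) 0
      max best cnt) best) 0

-- ===== PRECONDITION & SPEC =====
-- Pre_ excludes negative day (outside the task's natural domain: day is a nonnegative
-- square half-side); there A's inverted stamps happen to count mirrored squares while
-- B's empty intervals give 0.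
def Pre_check (day : Int) (points : List (Int × Int)) : Prop := 0 ≤ day
instance (day : Int) (points : List (Int × Int)) : Decidable (Pre_check day points) := by unfold Pre_check; infer_instance
def pvWitness_check : Int × (List (Int × Int)) := (1, [(0, 0), (1, 1)])
def Spec_check (day : Int) (points : List (Int × Int)) (out : Int) : Prop := out = check_alt day points
instance (day : Int) (points : List (Int × Int)) (out : Int) : Decidable (Spec_check day points out) := by unfold Spec_check; infer_instance

-- ===== CLAIM (what is proved, stated in full; the proofs are below) =====
def Claim_equal_check : Prop := ∀ (day : Int) (points : List (Int × Int)), Dom_check day points → Pre_check day points → Spec_check day points (check day points)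

-- ===== LEMMAS AND PROOFS =====

-- proof-side vocabulary
def pvXs (day : Int) (points : List (Int × Int)) : List Int :=
  PySem.List.sorted
    (PySem.Set.ofList (points.flatMap (fun p => [p.1 - day, p.1 + day + 1]))) (fun x => x) false

def pvYs (day : Int) (points : List (Int × Int)) : List Int :=
  PySem.List.sorted
    (PySem.Set.ofList (points.flatMap (fun p => [p.2 - day, p.2 + day + 1]))) (fun x => x) false

def pvDims (d : List (List Int)) (M N : Nat) : Prop :=
  d.length = M ∧ ∀ (k : Nat) (h : k < d.length), d[k].length = N

def pvP (g : Nat → Nat → Int) (i j : Nat) : Int :=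
  ∑ a ∈ Finset.range (i+1), ∑ b ∈ Finset.range (j+1), g a b

theorem pv_getD_set {α : Type} (l : List α) (df : α) (b j : Nat) (x : α) (hb : b < l.length) :
    (l.set b x).getD j df = if j = b then x else l.getD j df := by
  by_cases hj : j < l.length
  · rw [List.getD_eq_getElem _ _ (by simpa using hj), List.getElem_set]
    split_ifs with h1 h2 h3 <;> (try omega) <;>
      first
      | rfl
      | (rw [List.getD_eq_getElem _ _ hj])
  · rw [List.getD_eq_default _ _ (by simp only [List.length_set]; omega), List.getD_eq_default _ _ (by simpa using hj)]
    have : j ≠ b := by omega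
    simp [this]

theorem pv_mkmap_items (l : List Int) (hnd : l.Nodup) :
    (pvMkMap l).items = (PySem.List.enumerate l 0).map (fun kv => (kv.2, kv.1)) := by
  unfold pvMkMap
  rw [PySem.Dict.items_foldl_insert_fresh (PySem.List.enumerate l 0) (fun kv => kv.2) (fun kv => kv.1)
      PySem.Dict.empty (by intro a _; simp [PySem.Dict.contains_empty])
      (by simpa [PySem.List.map_snd_enumerate] using hnd)]
  simp [PySem.Dict.empty]

theorem pv_mkmap_keys (l : List Int) (hnd : l.Nodup) : (pvMkMap l).keys = l := by
  have h := pv_mkmap_items l hnd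
  simp only [PySem.Dict.keys, h, List.map_map]
  exact PySem.List.map_snd_enumerate l 0

theorem pv_mkmap_size (l : List Int) (hnd : l.Nodup) : (pvMkMap l).size = l.length := by
  simp only [PySem.Dict.size, pv_mkmap_items l hnd, List.length_map, PySem.List.length_enumerate]

theorem pv_look_mkmap (l : List Int) (hnd : l.Nodup) (v : Int) (hv : v ∈ l) :
    pvLook (pvMkMap l) v = (l.idxOf v : Int) := by
  have hk : l.idxOf v < l.length := List.idxOf_lt_length_of_mem hv
  have hkE : l[l.idxOf v] = v := List.getElem_idxOf hk
  have hmem : (v, (l.idxOf v : Int)) ∈ (pvMkMap l).items := by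
    rw [pv_mkmap_items l hnd]
    refine List.mem_map.2 ⟨(PySem.List.enumerate l 0)[l.idxOf v]'(by simpa [PySem.List.length_enumerate] using hk), List.getElem_mem _, ?_⟩
    rw [PySem.List.getElem_enumerate]
    simp [hkE]
  have hget := PySem.Dict.get?_of_mem_items _ hmem (by rw [pv_mkmap_keys l hnd]; exact hnd)
  simp [pvLook, hget]

theorem pvGet2_natCast (d : List (List Int)) (i j : Nat) :
    pvGet2 d (i : Int) (j : Int) = (d.getD i []).getD j 0 := by
  simp [pvGet2, PySem.List.pyGetD_natCast]

theorem pvAdd2_natCast (d : List (List Int)) (a b : Nat) (v : Int) :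
    pvAdd2 d (a : Int) (b : Int) v = d.set a ((d.getD a []).set b ((d.getD a []).getD b 0 + v)) := by
  simp [pvAdd2, PySem.List.pySetD_natCast, PySem.List.pyGetD_natCast, pvGet2]

theorem pvDims_add2 (d : List (List Int)) (M N : Nat) (hD : pvDims d M N)
    (a b : Nat) (ha : a < M) (v : Int) :
    pvDims (pvAdd2 d (a : Int) (b : Int) v) M N := by
  obtain ⟨hlen, hrow⟩ := hD
  have haL : a < d.length := by omega
  rw [pvAdd2_natCast]
  refine ⟨by simp [hlen], ?_⟩
  intro k hk
  rw [List.getElem_set]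
  split_ifs with h
  · subst h
    rw [List.length_set, List.getD_eq_getElem _ _ haL]
    exact hrow a haL
  · exact hrow k (by simpa using hk)

theorem pvGet2_add2 (d : List (List Int)) (M N : Nat) (hD : pvDims d M N)
    (a b i j : Nat) (ha : a < M) (hb : b < N) (v : Int) :
    pvGet2 (pvAdd2 d (a : Int) (b : Int) v) (i : Int) (j : Int)
      = pvGet2 d (i : Int) (j : Int) + (if i = a ∧ j = b then v else 0) := by
  obtain ⟨hlen, hrow⟩ := hD
  have haL : a < d.length := by omega
  have hbL : b < (d.getD a []).length := by
    rw [List.getD_eq_getElem _ _ haL]; rw [hrow a haL]; omega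
  rw [pvAdd2_natCast]
  rw [show pvGet2 (d.set a ((d.getD a []).set b ((d.getD a []).getD b 0 + v))) (i : Int) (j : Int)
        = ((d.set a ((d.getD a []).set b ((d.getD a []).getD b 0 + v))).getD i []).getD j 0
      from pvGet2_natCast _ i j,
      pvGet2_natCast d i j, pv_getD_set _ _ _ _ _ haL]
  by_cases hia : i = a
  · subst hia
    rw [if_pos rfl, pv_getD_set _ _ _ _ _ hbL]
    by_cases hjb : j = b
    · subst hjb
      rw [if_pos rfl, if_pos ⟨rfl, rfl⟩, List.getD_eq_getElem _ _ haL]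
    · rw [if_neg hjb, if_neg (by tauto)]
      rw [add_zero]
  · rw [if_neg hia, if_neg (by tauto), add_zero]

theorem pvDims_init (M N : Nat) :
    pvDims ((List.range M).map (fun _ => List.replicate N (0 : Int))) M N := by
  constructor
  · simp
  · intro k hk; simp at hk ⊢

theorem pvGet2_init (M N : Nat) (i j : Nat) :
    pvGet2 ((List.range M).map (fun _ => List.replicate N (0 : Int))) (i : Int) (j : Int) = 0 := by
  rw [pvGet2_natCast]
  rcases Nat.lt_or_ge i M with hi | hi
  · have h1 : ((List.range M).map (fun _ => List.replicate N (0:Int))).getD i [] = List.replicate N 0 := by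
      rw [List.getD_eq_getElem _ _ (by simpa using hi)]
      simp
    rw [h1]
    rcases Nat.lt_or_ge j N with hj | hj
    · rw [List.getD_eq_getElem _ _ (by simpa using hj)]
      simp
    · rw [List.getD_eq_default _ _ (by simpa using hj)]
  · have h1 : ((List.range M).map (fun _ => List.replicate N (0:Int))).getD i [] = [] :=
      List.getD_eq_default _ _ (by simpa using hi)
    rw [h1]
    simp

theorem pvP_col0 (g : Nat → Nat → Int) (hg : ∀ a, g a 0 = 0) (i : Nat) : pvP g i 0 = 0 := by
  unfold pvP
  refine Finset.sum_eq_zero ?_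
  intro a _
  simp [hg]

theorem pvP_row0 (g : Nat → Nat → Int) (hg : ∀ b, g 0 b = 0) (j : Nat) : pvP g 0 j = 0 := by
  unfold pvP
  simp
  refine Finset.sum_eq_zero ?_
  intro b _
  simp [hg]

theorem pvP_rec (g : Nat → Nat → Int) (i j : Nat) :
    pvP g (i+1) (j+1) = g (i+1) (j+1) + (pvP g i (j+1) + pvP g (i+1) j - pvP g i j) := by
  unfold pvP
  rw [Finset.sum_range_succ (fun a => ∑ b ∈ Finset.range (j+1+1), g a b) (i+1),
      Finset.sum_range_succ (fun b => g (i+1) b) (j+1),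
      Finset.sum_range_succ (fun a => ∑ b ∈ Finset.range (j+1), g a b) (i+1)]
  ring

theorem pv_inner_loop (M N : Nat) (g : Nat → Nat → Int) (i : Nat) (hiM : i + 1 < M)
    (I : Int) (hI : I = ((i : Nat) : Int) + 1) :
    ∀ (t w : Nat), (w + 1) + t = N → ∀ (d : List (List Int)) (ans : Int),
    pvDims d M N →
    (∀ a b, a ≤ i → b < N → pvGet2 d (a : Int) (b : Int) = pvP g a b) →
    (∀ b, b ≤ w → pvGet2 d ((i+1 : Nat) : Int) (b : Int) = pvP g (i+1) b) →
    (∀ b, w + 1 ≤ b → b < N → pvGet2 d ((i+1 : Nat) : Int) (b : Int) = g (i+1) b) →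
    (∀ a b, i + 1 < a → a < M → b < N → pvGet2 d (a : Int) (b : Int) = g a b) →
    (pvDims ((PySem.List.pyRange ((w+1 : Nat) : Int) ((N : Nat) : Int) 1).foldl
        (fun (st : List (List Int) × Int) j =>
          (pvAdd2 st.1 I j (pvGet2 st.1 (I-1) j + pvGet2 st.1 I (j-1) - pvGet2 st.1 (I-1) (j-1)),
           max st.2 (pvGet2 st.1 I j + (pvGet2 st.1 (I-1) j + pvGet2 st.1 I (j-1) - pvGet2 st.1 (I-1) (j-1)))))
        (d, ans)).1 M N) ∧
    (∀ a b, a ≤ i + 1 → b < N → pvGet2 ((PySem.List.pyRange ((w+1 : Nat) : Int) ((N : Nat) : Int) 1).foldl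
        (fun (st : List (List Int) × Int) j =>
          (pvAdd2 st.1 I j (pvGet2 st.1 (I-1) j + pvGet2 st.1 I (j-1) - pvGet2 st.1 (I-1) (j-1)),
           max st.2 (pvGet2 st.1 I j + (pvGet2 st.1 (I-1) j + pvGet2 st.1 I (j-1) - pvGet2 st.1 (I-1) (j-1)))))
        (d, ans)).1 (a : Int) (b : Int) = pvP g a b) ∧
    (∀ a b, i + 1 < a → a < M → b < N → pvGet2 ((PySem.List.pyRange ((w+1 : Nat) : Int) ((N : Nat) : Int) 1).foldl
        (fun (st : List (List Int) × Int) j =>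
          (pvAdd2 st.1 I j (pvGet2 st.1 (I-1) j + pvGet2 st.1 I (j-1) - pvGet2 st.1 (I-1) (j-1)),
           max st.2 (pvGet2 st.1 I j + (pvGet2 st.1 (I-1) j + pvGet2 st.1 I (j-1) - pvGet2 st.1 (I-1) (j-1)))))
        (d, ans)).1 (a : Int) (b : Int) = g a b) ∧
    ((PySem.List.pyRange ((w+1 : Nat) : Int) ((N : Nat) : Int) 1).foldl
        (fun (st : List (List Int) × Int) j =>
          (pvAdd2 st.1 I j (pvGet2 st.1 (I-1) j + pvGet2 st.1 I (j-1) - pvGet2 st.1 (I-1) (j-1)),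
           max st.2 (pvGet2 st.1 I j + (pvGet2 st.1 (I-1) j + pvGet2 st.1 I (j-1) - pvGet2 st.1 (I-1) (j-1)))))
        (d, ans)).2
      = (List.range t).foldl (fun acc u => max acc (pvP g (i+1) (w+1+u))) ans := by
  intro t
  induction t with
  | zero =>
    intro w ht d ans hD h1 h2 h3 h4
    have hnil : PySem.List.pyRange ((w+1 : Nat) : Int) ((N : Nat) : Int) 1 = [] := by
      apply PySem.List.pyRange_one_eq_nil
      omega
    rw [hnil]
    refine ⟨hD, ?_, h4, by simp⟩
    intro a b ha hb
    rcases Nat.lt_or_ge a (i+1) with h | h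
    · exact h1 a b (by omega) hb
    · have : a = i + 1 := by omega
      subst this
      exact h2 b (by omega)
  | succ t ih =>
    intro w ht d ans hD h1 h2 h3 h4
    have hcons : PySem.List.pyRange ((w+1 : Nat) : Int) ((N : Nat) : Int) 1
        = ((w+1 : Nat) : Int) :: PySem.List.pyRange ((w+1+1 : Nat) : Int) ((N : Nat) : Int) 1 := by
      rw [PySem.List.pyRange_one_cons (by exact_mod_cast (by omega : (w+1 : Int) < (N : Int)))]
      norm_num
    rw [hcons, List.foldl_cons]
    -- index rewrites
    have hI1 : I - 1 = ((i : Nat) : Int) := by rw [hI]; ring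
    have hJ1 : ((w+1 : Nat) : Int) - 1 = ((w : Nat) : Int) := by push_cast; ring
    have e1 : pvGet2 d I ((w+1 : Nat) : Int) = g (i+1) (w+1) := by
      rw [hI]; exact_mod_cast h3 (w+1) (le_refl _) (by omega)
    have e2 : pvGet2 d (I-1) ((w+1 : Nat) : Int) = pvP g i (w+1) := by
      rw [hI1]; exact h1 i (w+1) (le_refl _) (by omega)
    have e3 : pvGet2 d I (((w+1 : Nat) : Int) - 1) = pvP g (i+1) w := by
      rw [hJ1, hI]; exact_mod_cast h2 w (le_refl _)
    have e4 : pvGet2 d (I-1) (((w+1 : Nat) : Int) - 1) = pvP g i w := by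
      rw [hJ1, hI1]; exact h1 i w (le_refl _) (by omega)
    have hval : pvGet2 d I ((w+1 : Nat) : Int)
        + (pvGet2 d (I-1) ((w+1 : Nat) : Int) + pvGet2 d I (((w+1 : Nat) : Int)-1) - pvGet2 d (I-1) (((w+1 : Nat) : Int)-1))
        = pvP g (i+1) (w+1) := by
      rw [e1, e2, e3, e4, pvP_rec]
    set delta := pvGet2 d (I-1) ((w+1 : Nat) : Int) + pvGet2 d I (((w+1 : Nat) : Int)-1) - pvGet2 d (I-1) (((w+1 : Nat) : Int)-1) with hdelta
    have hIcast : I = ((i+1 : Nat) : Int) := by rw [hI]; push_cast; ring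
    have hD' : pvDims (pvAdd2 d I ((w+1 : Nat) : Int) delta) M N := by
      rw [hIcast]; exact pvDims_add2 d M N hD (i+1) (w+1) hiM delta
    have hget' : ∀ (a b : Nat), pvGet2 (pvAdd2 d I ((w+1 : Nat) : Int) delta) (a : Int) (b : Int)
        = pvGet2 d (a : Int) (b : Int) + (if a = i+1 ∧ b = w+1 then delta else 0) := by
      intro a b
      rw [hIcast]
      exact pvGet2_add2 d M N hD (i+1) (w+1) a b hiM (by omega) delta
    have hcell : pvGet2 (pvAdd2 d I ((w+1 : Nat) : Int) delta) ((i+1 : Nat) : Int) ((w+1 : Nat) : Int)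
        = pvP g (i+1) (w+1) := by
      rw [hget' (i+1) (w+1), if_pos ⟨rfl, rfl⟩, ← hIcast, ← hval]
    obtain ⟨C1, C2, C3, C4⟩ := ih (w+1) (by omega) (pvAdd2 d I ((w+1 : Nat) : Int) delta)
      (max ans (pvGet2 d I ((w+1 : Nat) : Int) + delta)) hD'
      (by
        intro a b ha hb
        rw [hget' a b, if_neg (by omega), add_zero]
        exact h1 a b ha hb)
      (by
        intro b hb
        rcases Nat.lt_or_ge b (w+1) with h | h
        · rw [hget' (i+1) b, if_neg (by omega), add_zero]
          exact h2 b (by omega)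
        · have : b = w + 1 := by omega
          subst this
          exact hcell)
      (by
        intro b hb hbN
        rw [hget' (i+1) b, if_neg (by omega), add_zero]
        exact h3 b (by omega) hbN)
      (by
        intro a b ha haM hb
        rw [hget' a b, if_neg (by omega), add_zero]
        exact h4 a b ha haM hb)
    refine ⟨C1, C2, C3, ?_⟩
    rw [C4]
    have hmax : max ans (pvGet2 d I ((w+1 : Nat) : Int) + delta) = max ans (pvP g (i+1) (w+1)) := by
      rw [hdelta, hval]
    rw [hmax]
    rw [List.range_succ_eq_map, List.foldl_cons, List.foldl_map]
    have : ∀ (acc : Int), ∀ u ∈ List.range t,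
        (fun acc u => max acc (pvP g (i+1) (w+1+1+u))) acc u
          = (fun acc u => max acc (pvP g (i+1) (w+1+Nat.succ u))) acc u := by
      intro acc u _
      show max acc (pvP g (i+1) (w+1+1+u)) = max acc (pvP g (i+1) (w+1+Nat.succ u))
      rw [show w+1+1+u = w+1+Nat.succ u by omega]
    rw [PySem.List.foldl_congr_mem _ _ _ _ this]

theorem pv_outer_loop (M N : Nat) (g : Nat → Nat → Int) (hN : 1 ≤ N)
    (hgc : ∀ a, g a 0 = 0) :
    ∀ (t i0 : Nat), i0 + t = M → 1 ≤ i0 → ∀ (d : List (List Int)) (ans : Int),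
    pvDims d M N →
    (∀ a b, a < i0 → b < N → pvGet2 d (a : Int) (b : Int) = pvP g a b) →
    (∀ a b, i0 ≤ a → a < M → b < N → pvGet2 d (a : Int) (b : Int) = g a b) →
    ((PySem.List.pyRange ((i0 : Nat) : Int) ((M : Nat) : Int) 1).foldl
      (fun (st : List (List Int) × Int) i =>
        (PySem.List.pyRange 1 ((N : Nat) : Int) 1).foldl
          (fun (st : List (List Int) × Int) j =>
            (pvAdd2 st.1 i j (pvGet2 st.1 (i-1) j + pvGet2 st.1 i (j-1) - pvGet2 st.1 (i-1) (j-1)),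
             max st.2 (pvGet2 st.1 i j + (pvGet2 st.1 (i-1) j + pvGet2 st.1 i (j-1) - pvGet2 st.1 (i-1) (j-1)))))
          st)
      (d, ans)).2
    = (List.range t).foldl
        (fun acc u => (List.range (N-1)).foldl (fun acc w => max acc (pvP g (i0+u) (1+w))) acc) ans := by
  intro t
  induction t with
  | zero =>
    intro i0 ht h1i d ans hD hdone htodo
    have hnil : PySem.List.pyRange ((i0 : Nat) : Int) ((M : Nat) : Int) 1 = [] := by
      apply PySem.List.pyRange_one_eq_nil; omega
    rw [hnil]
    simp
  | succ t ih =>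
    intro i0 ht h1i d ans hD hdone htodo
    obtain ⟨i', rfl⟩ : ∃ i', i0 = i' + 1 := ⟨i0 - 1, by omega⟩
    have hcons : PySem.List.pyRange ((i'+1 : Nat) : Int) ((M : Nat) : Int) 1
        = ((i'+1 : Nat) : Int) :: PySem.List.pyRange ((i'+1+1 : Nat) : Int) ((M : Nat) : Int) 1 := by
      rw [PySem.List.pyRange_one_cons (by exact_mod_cast (by omega : ((i'+1 : Nat) : Int) < (M : Int)))]
      norm_num
    rw [hcons, List.foldl_cons]
    have hiM : i' + 1 < M := by omega
    obtain ⟨C1, C2, C3, C4⟩ := pv_inner_loop M N g i' hiM ((i'+1 : Nat) : Int) (by push_cast; ring)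
      (N-1) 0 (by omega) d ans hD
      (by intro a b ha hb; exact hdone a b (by omega) hb)
      (by
        intro b hb
        have : b = 0 := by omega
        subst this
        rw [htodo (i'+1) 0 (le_refl _) hiM (by omega), hgc, pvP_col0 g hgc])
      (by intro b hb hbN; exact htodo (i'+1) b (le_refl _) hiM hbN)
      (by intro a b ha haM hb; exact htodo a b (by omega) haM hb)
    rw [show ((0+1 : Nat) : Int) = (1 : Int) by norm_num] at C1 C2 C3 C4
    set st' := (PySem.List.pyRange (1 : Int) ((N : Nat) : Int) 1).foldl
        (fun (st : List (List Int) × Int) j =>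
          (pvAdd2 st.1 ((i'+1 : Nat) : Int) j (pvGet2 st.1 (((i'+1 : Nat) : Int)-1) j + pvGet2 st.1 ((i'+1 : Nat) : Int) (j-1) - pvGet2 st.1 (((i'+1 : Nat) : Int)-1) (j-1)),
           max st.2 (pvGet2 st.1 ((i'+1 : Nat) : Int) j + (pvGet2 st.1 (((i'+1 : Nat) : Int)-1) j + pvGet2 st.1 ((i'+1 : Nat) : Int) (j-1) - pvGet2 st.1 (((i'+1 : Nat) : Int)-1) (j-1)))))
        (d, ans) with hst'
    rw [← Prod.mk.eta (p := st')]
    rw [ih (i'+1+1) (by omega) (by omega) st'.1 st'.2 C1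
      (by intro a b ha hb; exact C2 a b (by omega) hb)
      (by intro a b ha haM hb; exact C3 a b (by omega) haM hb)]
    rw [C4]
    rw [List.range_succ_eq_map, List.foldl_cons, List.foldl_map]
    have h0 : (List.range (N-1)).foldl (fun acc w => max acc (pvP g (i'+1+0) (1+w))) ans
        = (List.range (N-1)).foldl (fun acc u => max acc (pvP g (i'+1) (0+1+u))) ans := by
      apply PySem.List.foldl_congr_mem
      intro acc u _
      show max acc (pvP g (i'+1+0) (1+u)) = max acc (pvP g (i'+1) (0+1+u))
      rw [show i'+1+0 = i'+1 from rfl, show 0+1+u = 1+u by omega]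
    rw [h0]
    apply PySem.List.foldl_congr_mem
    intro acc u _
    show (List.range (N-1)).foldl (fun acc w => max acc (pvP g (i'+1+1+u) (1+w))) acc
        = (List.range (N-1)).foldl (fun acc w => max acc (pvP g (i'+1+Nat.succ u) (1+w))) acc
    rw [show i'+1+Nat.succ u = i'+1+1+u by omega]

def pvInd (a i : Nat) : Int := if i = a then 1 else 0

def pvC (day : Int) (xs ys : List Int) (p : Int × Int) (i j : Nat) : Int :=
  (pvInd (xs.idxOf (p.1 - day) + 1) i - pvInd (xs.idxOf (p.1 + day + 1) + 1) i) *
  (pvInd (ys.idxOf (p.2 - day) + 1) j - pvInd (ys.idxOf (p.2 + day + 1) + 1) j)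

theorem pv_stamp_cell (a1 a2 b1 b2 i j : Nat) :
    (((if i = a1 ∧ j = b1 then (1:Int) else 0) + (if i = a1 ∧ j = b2 then (-1:Int) else 0))
      + (if i = a2 ∧ j = b1 then (-1:Int) else 0)) + (if i = a2 ∧ j = b2 then (1:Int) else 0)
    = (pvInd a1 i - pvInd a2 i) * (pvInd b1 j - pvInd b2 j) := by
  unfold pvInd
  split_ifs <;> norm_num <;> tauto

theorem pv_stamp (day : Int) (xs ys : List Int) :
    ∀ (pts : List (Int × Int)),
    (∀ p ∈ pts, p.1 - day ∈ xs ∧ p.1 + day + 1 ∈ xs ∧ p.2 - day ∈ ys ∧ p.2 + day + 1 ∈ ys) →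
    xs.Nodup → ys.Nodup →
    ∀ (d : List (List Int)), pvDims d (xs.length+1) (ys.length+1) →
    pvDims (pts.foldl
      (fun d p => pvAdd2 (pvAdd2 (pvAdd2 (pvAdd2 d (pvLook (pvMkMap xs) (p.1 - day) + 1) (pvLook (pvMkMap ys) (p.2 - day) + 1) 1) (pvLook (pvMkMap xs) (p.1 - day) + 1) (pvLook (pvMkMap ys) (p.2 + day + 1) + 1) (-1)) (pvLook (pvMkMap xs) (p.1 + day + 1) + 1) (pvLook (pvMkMap ys) (p.2 - day) + 1) (-1)) (pvLook (pvMkMap xs) (p.1 + day + 1) + 1) (pvLook (pvMkMap ys) (p.2 + day + 1) + 1) 1)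
      d) (xs.length+1) (ys.length+1) ∧
    ∀ (i j : Nat), i < xs.length+1 → j < ys.length+1 →
      pvGet2 ((pts.foldl
        (fun d p => pvAdd2 (pvAdd2 (pvAdd2 (pvAdd2 d (pvLook (pvMkMap xs) (p.1 - day) + 1) (pvLook (pvMkMap ys) (p.2 - day) + 1) 1) (pvLook (pvMkMap xs) (p.1 - day) + 1) (pvLook (pvMkMap ys) (p.2 + day + 1) + 1) (-1)) (pvLook (pvMkMap xs) (p.1 + day + 1) + 1) (pvLook (pvMkMap ys) (p.2 - day) + 1) (-1)) (pvLook (pvMkMap xs) (p.1 + day + 1) + 1) (pvLook (pvMkMap ys) (p.2 + day + 1) + 1) 1)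
        d)) (i : Int) (j : Int)
      = pvGet2 d (i : Int) (j : Int) + (pts.map (fun p => pvC day xs ys p i j)).sum := by
  intro pts
  induction pts with
  | nil =>
    intro _ _ _ d hD
    exact ⟨hD, by intro i j _ _; simp⟩
  | cons p rest ih =>
    intro hmem hndx hndy d hD
    obtain ⟨hm1, hm2, hm3, hm4⟩ := hmem p (List.mem_cons_self)
    have hix1 : xs.idxOf (p.1 - day) < xs.length := List.idxOf_lt_length_of_mem hm1
    have hix2 : xs.idxOf (p.1 + day + 1) < xs.length := List.idxOf_lt_length_of_mem hm2
    have hiy1 : ys.idxOf (p.2 - day) < ys.length := List.idxOf_lt_length_of_mem hm3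
    have hiy2 : ys.idxOf (p.2 + day + 1) < ys.length := List.idxOf_lt_length_of_mem hm4
    have l1 : pvLook (pvMkMap xs) (p.1 - day) + 1 = ((xs.idxOf (p.1 - day) + 1 : Nat) : Int) := by
      rw [pv_look_mkmap xs hndx _ hm1]; push_cast; ring
    have l2 : pvLook (pvMkMap xs) (p.1 + day + 1) + 1 = ((xs.idxOf (p.1 + day + 1) + 1 : Nat) : Int) := by
      rw [pv_look_mkmap xs hndx _ hm2]; push_cast; ring
    have l3 : pvLook (pvMkMap ys) (p.2 - day) + 1 = ((ys.idxOf (p.2 - day) + 1 : Nat) : Int) := by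
      rw [pv_look_mkmap ys hndy _ hm3]; push_cast; ring
    have l4 : pvLook (pvMkMap ys) (p.2 + day + 1) + 1 = ((ys.idxOf (p.2 + day + 1) + 1 : Nat) : Int) := by
      rw [pv_look_mkmap ys hndy _ hm4]; push_cast; ring
    set a1 := xs.idxOf (p.1 - day) + 1
    set a2 := xs.idxOf (p.1 + day + 1) + 1
    set b1 := ys.idxOf (p.2 - day) + 1
    set b2 := ys.idxOf (p.2 + day + 1) + 1
    have ha1 : a1 < xs.length + 1 := by omega
    have ha2 : a2 < xs.length + 1 := by omega
    have hb1 : b1 < ys.length + 1 := by omega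
    have hb2 : b2 < ys.length + 1 := by omega
    rw [List.foldl_cons]
    simp only [l1, l2, l3, l4]
    have hD1 := pvDims_add2 d _ _ hD a1 b1 ha1 1
    have hD2 := pvDims_add2 _ _ _ hD1 a1 b2 ha1 (-1)
    have hD3 := pvDims_add2 _ _ _ hD2 a2 b1 ha2 (-1)
    have hD4 := pvDims_add2 _ _ _ hD3 a2 b2 ha2 1
    obtain ⟨R1, R2⟩ := ih (fun q hq => hmem q (List.mem_cons_of_mem _ hq)) hndx hndy _ hD4
    refine ⟨R1, ?_⟩
    intro i j hi hj
    rw [R2 i j hi hj]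
    rw [pvGet2_add2 _ _ _ hD3 a2 b2 i j ha2 hb2 1,
        pvGet2_add2 _ _ _ hD2 a2 b1 i j ha2 hb1 (-1),
        pvGet2_add2 _ _ _ hD1 a1 b2 i j ha1 hb2 (-1),
        pvGet2_add2 _ _ _ hD a1 b1 i j ha1 hb1 1]
    rw [List.map_cons, List.sum_cons]
    have : pvC day xs ys p i j = (pvInd a1 i - pvInd a2 i) * (pvInd b1 j - pvInd b2 j) := rfl
    rw [this, ← pv_stamp_cell a1 a2 b1 b2 i j]
    ring

theorem pv_foldl_eq_range_foldl {α β : Type} (l : List α) (dflt : α) (f : β → α → β) (init : β) :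
    l.foldl f init = (List.range l.length).foldl (fun acc k => f acc (l.getD k dflt)) init := by
  induction l generalizing init with
  | nil => simp
  | cons x t ih =>
    simp only [List.length_cons, List.range_succ_eq_map, List.foldl_cons, List.foldl_map]
    simpa using ih (f init x)

theorem pv_flatMap_foldl_add (l : List (Int × Int)) (f h : Int × Int → Int) (s : PySem.Set Int) :
    (l.flatMap (fun p => [f p, h p])).foldl PySem.Set.add s
      = l.foldl (fun s p => PySem.Set.add (PySem.Set.add s (f p)) (h p)) s := by
  induction l generalizing s with
  | nil => rfl
  | cons x t ih => simp only [List.flatMap_cons, List.foldl_append, List.foldl_cons]; exact ih _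

theorem pv_sum_exchange {α : Type} (l : List α) (s : Finset Nat) (F : α → Nat → Int) :
    ∑ a ∈ s, (l.map (fun p => F p a)).sum = (l.map (fun p => ∑ a ∈ s, F p a)).sum := by
  induction l with
  | nil => simp
  | cons x t ih => simp [Finset.sum_add_distrib, ih]

theorem pv_sum_ind (t n : Nat) :
    ∑ a ∈ Finset.range n, pvInd t a = if t < n then 1 else 0 := by
  unfold pvInd
  rw [Finset.sum_ite_eq' (Finset.range n) t (fun _ => (1:Int))]
  simp

theorem pv_sorted_le_iff (l : List Int) (hp : l.Pairwise (· < ·)) (a b : Nat)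
    (ha : a < l.length) (hb : b < l.length) : a ≤ b ↔ l[a] ≤ l[b] := by
  rw [List.pairwise_iff_getElem] at hp
  constructor
  · intro hab
    rcases Nat.lt_or_ge a b with h | h
    · exact le_of_lt (hp a b ha hb h)
    · have : a = b := by omega
      subst this; rfl
  · intro hle
    by_contra hab
    have hba : b < a := by omega
    have := hp b a hb ha hba
    omega

theorem pv_ite_mul (P Q : Prop) [Decidable P] [Decidable Q] :
    (if P then (1:Int) else 0) * (if Q then (1:Int) else 0) = if P ∧ Q then 1 else 0 := by
  split_ifs <;> norm_num <;> tauto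

theorem pv_sum_ite {α : Type} (l : List α) (C : α → Prop) [DecidablePred C] :
    (l.map (fun x => if C x then (1:Int) else 0)).sum = (l.countP (fun x => decide (C x)) : Int) := by
  induction l with
  | nil => simp
  | cons x t ih =>
    by_cases h : C x <;> simp [h, ih] <;> try ring

theorem pv_axis (day : Int) (hday : 0 ≤ day) (l : List Int) (hp : l.Pairwise (· < ·)) (c : Int)
    (hm1 : c - day ∈ l) (hm2 : c + day + 1 ∈ l) (k : Nat) (hk : k < l.length) :
    (if l.idxOf (c - day) + 1 < k + 2 then (1:Int) else 0)
      - (if l.idxOf (c + day + 1) + 1 < k + 2 then (1:Int) else 0)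
    = if c - day ≤ l.getD k 0 ∧ l.getD k 0 ≤ c + day then 1 else 0 := by
  have h1L : l.idxOf (c - day) < l.length := List.idxOf_lt_length_of_mem hm1
  have h2L : l.idxOf (c + day + 1) < l.length := List.idxOf_lt_length_of_mem hm2
  have hg : l.getD k 0 = l[k] := List.getD_eq_getElem _ _ hk
  have hA1 : l.idxOf (c - day) ≤ k ↔ c - day ≤ l[k] := by
    have := pv_sorted_le_iff l hp (l.idxOf (c - day)) k h1L hk
    rwa [List.getElem_idxOf h1L] at this
  have hA2 : l.idxOf (c + day + 1) ≤ k ↔ c + day + 1 ≤ l[k] := by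
    have := pv_sorted_le_iff l hp (l.idxOf (c + day + 1)) k h2L hk
    rwa [List.getElem_idxOf h2L] at this
  rw [hg]
  have e1 : (l.idxOf (c - day) + 1 < k + 2) ↔ (c - day ≤ l[k]) := by
    rw [← hA1]; omega
  have e2 : (l.idxOf (c + day + 1) + 1 < k + 2) ↔ (c + day + 1 ≤ l[k]) := by
    rw [← hA2]; omega
  simp only [e1, e2]
  split_ifs <;> omega

def pvCnt (day : Int) (points : List (Int × Int)) (x y : Int) : Int :=
  (points.countP (fun p => decide (p.1 - day ≤ x ∧ x ≤ p.1 + day ∧ p.2 - day ≤ y ∧ y ≤ p.2 + day)) : Int)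

theorem pv_PT (day : Int) (hday : 0 ≤ day) (points : List (Int × Int)) (xs ys : List Int)
    (hpx : xs.Pairwise (· < ·)) (hpy : ys.Pairwise (· < ·))
    (hmem : ∀ p ∈ points, p.1 - day ∈ xs ∧ p.1 + day + 1 ∈ xs ∧ p.2 - day ∈ ys ∧ p.2 + day + 1 ∈ ys)
    (k l : Nat) (hk : k < xs.length) (hl : l < ys.length) :
    pvP (fun a b => (points.map (fun p => pvC day xs ys p a b)).sum) (k+1) (l+1)
      = pvCnt day points (xs.getD k 0) (ys.getD l 0) := by
  unfold pvP pvCnt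
  have E : ∑ a ∈ Finset.range (k+1+1), ∑ b ∈ Finset.range (l+1+1), (points.map (fun p => pvC day xs ys p a b)).sum
      = (points.map (fun p => ∑ a ∈ Finset.range (k+1+1), ∑ b ∈ Finset.range (l+1+1), pvC day xs ys p a b)).sum := by
    rw [← pv_sum_exchange]
    exact Finset.sum_congr rfl (fun a _ => pv_sum_exchange points _ _)
  rw [E]
  have per : ∀ p ∈ points, (fun p => ∑ a ∈ Finset.range (k+1+1), ∑ b ∈ Finset.range (l+1+1), pvC day xs ys p a b) p
      = (fun p => if p.1 - day ≤ xs.getD k 0 ∧ xs.getD k 0 ≤ p.1 + day ∧ p.2 - day ≤ ys.getD l 0 ∧ ys.getD l 0 ≤ p.2 + day then (1:Int) else 0) p := by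
    intro p hp
    obtain ⟨m1, m2, m3, m4⟩ := hmem p hp
    show ∑ a ∈ Finset.range (k+1+1), ∑ b ∈ Finset.range (l+1+1), pvC day xs ys p a b = _
    unfold pvC
    rw [← Finset.sum_mul_sum]
    rw [Finset.sum_sub_distrib, Finset.sum_sub_distrib, pv_sum_ind, pv_sum_ind, pv_sum_ind, pv_sum_ind]
    rw [pv_axis day hday xs hpx p.1 m1 m2 k hk, pv_axis day hday ys hpy p.2 m3 m4 l hl]
    rw [pv_ite_mul]
    simp only [and_assoc]
  rw [List.map_congr_left per]
  exact pv_sum_ite points _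


-- facts about the compressed coordinate lists -------------------------------
theorem pv_xs_pairwise (day : Int) (points : List (Int × Int)) :
    (pvXs day points).Pairwise (· < ·) :=
  PySem.List.sorted_ofList_pairwise_lt _

theorem pv_ys_pairwise (day : Int) (points : List (Int × Int)) :
    (pvYs day points).Pairwise (· < ·) :=
  PySem.List.sorted_ofList_pairwise_lt _

theorem pv_xs_nodup (day : Int) (points : List (Int × Int)) : (pvXs day points).Nodup :=
  (pv_xs_pairwise day points).imp ne_of_lt

theorem pv_ys_nodup (day : Int) (points : List (Int × Int)) : (pvYs day points).Nodup :=
  (pv_ys_pairwise day points).imp ne_of_lt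

theorem pv_mem_xs (day : Int) (points : List (Int × Int)) :
    ∀ p ∈ points, p.1 - day ∈ pvXs day points ∧ p.1 + day + 1 ∈ pvXs day points
      ∧ p.2 - day ∈ pvYs day points ∧ p.2 + day + 1 ∈ pvYs day points := by
  intro p hp
  unfold pvXs pvYs
  simp only [PySem.List.mem_sorted, PySem.Set.mem_ofList, List.mem_flatMap]
  exact ⟨⟨p, hp, by simp⟩, ⟨p, hp, by simp⟩, ⟨p, hp, by simp⟩, ⟨p, hp, by simp⟩⟩

theorem pv_Sc_row0 (day : Int) (points : List (Int × Int)) (xs ys : List Int) (b : Nat) :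
    (points.map (fun p => pvC day xs ys p 0 b)).sum = 0 := by
  apply List.sum_eq_zero
  intro x hx
  obtain ⟨p, _, rfl⟩ := List.mem_map.1 hx
  simp [pvC, pvInd]

theorem pv_Sc_col0 (day : Int) (points : List (Int × Int)) (xs ys : List Int) (a : Nat) :
    (points.map (fun p => pvC day xs ys p a 0)).sum = 0 := by
  apply List.sum_eq_zero
  intro x hx
  obtain ⟨p, _, rfl⟩ := List.mem_map.1 hx
  simp [pvC, pvInd]

-- characterization of A ------------------------------------------------------
theorem pv_A_core (day : Int) (points : List (Int × Int)) (xs ys : List Int)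
    (hndx : xs.Nodup) (hndy : ys.Nodup)
    (hmem : ∀ p ∈ points, p.1 - day ∈ xs ∧ p.1 + day + 1 ∈ xs ∧ p.2 - day ∈ ys ∧ p.2 + day + 1 ∈ ys) :
    ((PySem.List.pyRange ((1 : Nat) : Int) ((xs.length + 1 : Nat) : Int) 1).foldl
      (fun (st : List (List Int) × Int) i =>
        (PySem.List.pyRange 1 ((ys.length + 1 : Nat) : Int) 1).foldl
          (fun (st : List (List Int) × Int) j =>
            (pvAdd2 st.1 i j (pvGet2 st.1 (i-1) j + pvGet2 st.1 i (j-1) - pvGet2 st.1 (i-1) (j-1)),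
             max st.2 (pvGet2 st.1 i j + (pvGet2 st.1 (i-1) j + pvGet2 st.1 i (j-1) - pvGet2 st.1 (i-1) (j-1)))))
          st)
      (points.foldl
        (fun d p => pvAdd2 (pvAdd2 (pvAdd2 (pvAdd2 d (pvLook (pvMkMap xs) (p.1 - day) + 1) (pvLook (pvMkMap ys) (p.2 - day) + 1) 1) (pvLook (pvMkMap xs) (p.1 - day) + 1) (pvLook (pvMkMap ys) (p.2 + day + 1) + 1) (-1)) (pvLook (pvMkMap xs) (p.1 + day + 1) + 1) (pvLook (pvMkMap ys) (p.2 - day) + 1) (-1)) (pvLook (pvMkMap xs) (p.1 + day + 1) + 1) (pvLook (pvMkMap ys) (p.2 + day + 1) + 1) 1)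
        ((List.range (xs.length + 1)).map (fun _ => List.replicate (ys.length + 1) (0 : Int)))
      , 0)).2
    = (List.range xs.length).foldl
        (fun acc u => (List.range ys.length).foldl
          (fun acc w => max acc
            (pvP (fun a b => (points.map (fun p => pvC day xs ys p a b)).sum) (1+u) (1+w))) acc) 0 := by
  obtain ⟨hDims, hGet⟩ := pv_stamp day xs ys points hmem hndx hndy
    ((List.range (xs.length + 1)).map (fun _ => List.replicate (ys.length + 1) (0 : Int)))
    (pvDims_init _ _)
  have hrw := pv_outer_loop (xs.length + 1) (ys.length + 1)
    (fun a b => (points.map (fun p => pvC day xs ys p a b)).sum)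
    (by omega)
    (fun a => pv_Sc_col0 day points xs ys a)
    xs.length 1 (by omega) (by omega) _ 0 hDims
    (by
      intro a b ha hb
      have : a = 0 := by omega
      subst this
      rw [hGet 0 b (by omega) hb, pvGet2_init _ _ 0 b, pv_Sc_row0, zero_add,
          pvP_row0 _ (fun b => pv_Sc_row0 day points xs ys b)])
    (by
      intro a b _ ha hb
      rw [hGet a b ha hb, pvGet2_init, zero_add])
  rw [Nat.add_sub_cancel] at hrw
  exact hrw

set_option maxHeartbeats 1000000 in
theorem pv_A_char (day : Int) (points : List (Int × Int)) :
    check day points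
      = (List.range (pvXs day points).length).foldl
          (fun acc u => (List.range (pvYs day points).length).foldl
            (fun acc w => max acc
              (pvP (fun a b => (points.map (fun p => pvC day (pvXs day points) (pvYs day points) p a b)).sum)
                (1+u) (1+w))) acc) 0 := by
  unfold check
  simp only [PySem.List.foldl_prod_mk
    (f := fun (s : PySem.Set Int) (p : Int × Int) => PySem.Set.add (PySem.Set.add s (p.1 - day)) (p.1 + day + 1))
    (g := fun (s : PySem.Set Int) (p : Int × Int) => PySem.Set.add (PySem.Set.add s (p.2 - day)) (p.2 + day + 1))]
  simp only [PySem.Set.empty]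
  rw [← pv_flatMap_foldl_add points (fun p => p.1 - day) (fun p => p.1 + day + 1) [],
      ← pv_flatMap_foldl_add points (fun p => p.2 - day) (fun p => p.2 + day + 1) [],
      ← PySem.Set.ofList_eq_foldl, ← PySem.Set.ofList_eq_foldl]
  rw [show PySem.List.sorted (PySem.Set.ofList (points.flatMap (fun p => [p.1 - day, p.1 + day + 1]))) (fun x => x) false = pvXs day points from rfl,
      show PySem.List.sorted (PySem.Set.ofList (points.flatMap (fun p => [p.2 - day, p.2 + day + 1]))) (fun x => x) false = pvYs day points from rfl]
  rw [pv_mkmap_size _ (pv_xs_nodup day points), pv_mkmap_size _ (pv_ys_nodup day points)]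
  have hL1 : (((pvXs day points).length : Int) + 1) = (((pvXs day points).length + 1 : Nat) : Int) := by
    push_cast; ring
  have hK1 : (((pvYs day points).length : Int) + 1) = (((pvYs day points).length + 1 : Nat) : Int) := by
    push_cast; ring
  rw [hL1, hK1, Int.toNat_natCast, Int.toNat_natCast]
  rw [show PySem.List.pyRange (1 : Int) (((pvXs day points).length + 1 : Nat) : Int) 1
        = PySem.List.pyRange ((1 : Nat) : Int) (((pvXs day points).length + 1 : Nat) : Int) 1 by norm_num]
  exact pv_A_core day points (pvXs day points) (pvYs day points)
    (pv_xs_nodup day points) (pv_ys_nodup day points) (pv_mem_xs day points)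

-- characterization of B ------------------------------------------------------
theorem pv_B_char (day : Int) (points : List (Int × Int)) :
    check_alt day points
      = (List.range (pvXs day points).length).foldl
          (fun acc u => (List.range (pvYs day points).length).foldl
            (fun acc w => max acc
              (pvCnt day points ((pvXs day points).getD u 0) ((pvYs day points).getD w 0))) acc) 0 := by
  unfold check_alt
  rw [show PySem.List.sorted (PySem.Set.ofList (points.flatMap (fun p => [p.1 - day, p.1 + day + 1]))) (fun x => x) false = pvXs day points from rfl,
      show PySem.List.sorted (PySem.Set.ofList (points.flatMap (fun p => [p.2 - day, p.2 + day + 1]))) (fun x => x) false = pvYs day points from rfl]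
  rw [pv_foldl_eq_range_foldl (pvXs day points) 0 _ 0]
  apply PySem.List.foldl_congr_mem
  intro acc u hu
  show (pvYs day points).foldl _ acc = _
  rw [pv_foldl_eq_range_foldl (pvYs day points) 0 _ acc]
  apply PySem.List.foldl_congr_mem
  intro acc2 w hw
  show max acc2 (points.foldl _ 0) = max acc2 (pvCnt day points _ _)
  rw [PySem.List.foldl_ite_add_one
    (fun p : Int × Int => p.1 - day ≤ (pvXs day points).getD u 0 ∧ (pvXs day points).getD u 0 ≤ p.1 + day
      ∧ p.2 - day ≤ (pvYs day points).getD w 0 ∧ (pvYs day points).getD w 0 ≤ p.2 + day) points 0]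
  rw [zero_add]
  rfl

theorem pv_main (day : Int) (points : List (Int × Int)) (hday : 0 ≤ day) :
    check day points = check_alt day points := by
  rw [pv_A_char day points, pv_B_char day points]
  apply PySem.List.foldl_congr_mem
  intro acc u hu
  show (List.range (pvYs day points).length).foldl _ acc = (List.range (pvYs day points).length).foldl _ acc
  apply PySem.List.foldl_congr_mem
  intro acc2 w hw
  show max acc2 (pvP _ (1+u) (1+w)) = max acc2 (pvCnt day points _ _)
  rw [show 1+u = u+1 by omega, show 1+w = w+1 by omega]
  rw [pv_PT day hday points (pvXs day points) (pvYs day points)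
    (pv_xs_pairwise day points) (pv_ys_pairwise day points) (pv_mem_xs day points)
    u w (by simpa using hu) (by simpa using hw)]

-- ===== VERDICT (by name: the statement is the Claim_ definition above) =====
theorem check_spec : Claim_equal_check := by
  intro day points _ hpre
  unfold Spec_check
  exact pv_main day points hpre
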